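-- pv_equiv track=rewrite | github.com/baanaalhaji-cyber/AI-Desktop-Partner | train.py | name_identifier
-- ===== SOURCE A (Python) =====
-- def name_identifier(S):
--     temp = []
--     S = S.split()
--
--     for i in S:
--         if i == 'your' or i == 'name':
--             temp.append(i)
--
--     if len(temp) < 1:
--         return False
--
--     if temp[0] == 'your':
--         return True
--     return False
-- ===== SOURCE B (Python) =====
-- def name_identifier(S):
--     for w in S.split():
--         if w == 'your':
--             return True
--         if w == 'name':
--             return False
--     return False
-- ===== Notes on version B (the rewrite author's own statement) =====
-- stated objective: simpler
-- what changed: Replaces build-a-filtered-list-then-index with a single early-returning scan over the words, with no accumulator or emptiness check.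
import Mathlib
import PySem

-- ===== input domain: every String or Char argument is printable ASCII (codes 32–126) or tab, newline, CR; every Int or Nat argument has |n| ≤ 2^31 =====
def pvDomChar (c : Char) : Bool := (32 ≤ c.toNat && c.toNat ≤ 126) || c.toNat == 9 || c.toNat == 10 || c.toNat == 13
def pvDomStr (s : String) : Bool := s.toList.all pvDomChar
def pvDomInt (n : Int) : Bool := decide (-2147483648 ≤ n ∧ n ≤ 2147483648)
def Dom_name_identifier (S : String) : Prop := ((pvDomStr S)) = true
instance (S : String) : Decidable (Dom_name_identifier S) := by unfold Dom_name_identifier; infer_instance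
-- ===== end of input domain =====

-- B is a single early-returning scan over the words: no intermediate filtered list, no emptiness/index check (objective: simpler).

-- ===== PORT A =====
def name_identifier (S : String) : Bool :=
  let words := PySem.Str.split₀ S
  let temp := words.foldl (fun acc i => if i == "your" || i == "name" then acc ++ [i] else acc) []
  if temp.length < 1 then false
  else if temp[0]! == "your" then true
  else false

-- ===== PORT B =====
def nameIdScan : List String → Bool
  | [] => false
  | w :: ws => if w == "your" then true else if w == "name" then false else nameIdScan ws

def name_identifier_alt (S : String) : Bool := nameIdScan (PySem.Str.split₀ S)

-- ===== PRECONDITION & SPEC =====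
def Spec_name_identifier (S : String) (out : Bool) : Prop := out = name_identifier_alt S
instance (S : String) (out : Bool) : Decidable (Spec_name_identifier S out) := by unfold Spec_name_identifier; infer_instance

-- ===== CLAIM (what is proved, stated in full; the proofs are below) =====
def Claim_equal_name_identifier : Prop := ∀ (S : String), Dom_name_identifier S → Spec_name_identifier S (name_identifier S)

-- ===== LEMMAS AND PROOFS =====

-- A's foldl-filter equals List.filter (generalized over accumulator)
theorem nameId_foldl_filter (ws : List String) (acc : List String) :
    ws.foldl (fun acc i => if i == "your" || i == "name" then acc ++ [i] else acc) acc
      = acc ++ ws.filter (fun i => i == "your" || i == "name") := by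
  induction ws generalizing acc with
  | nil => simp
  | cons w ws ih =>
    rw [List.foldl_cons, List.filter_cons]
    by_cases h : (w == "your" || w == "name") = true
    · rw [if_pos h, if_pos h, ih, List.append_assoc]; rfl
    · rw [if_neg h, if_neg h, ih]

-- A's post-processing of the filtered list
def nameIdTail (temp : List String) : Bool :=
  if temp.length < 1 then false
  else if temp[0]! == "your" then true
  else false

theorem nameId_agree (ws : List String) :
    nameIdTail (ws.filter (fun i => i == "your" || i == "name")) = nameIdScan ws := by
  induction ws with
  | nil => simp [nameIdScan, nameIdTail]
  | cons w ws ih =>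
    rw [List.filter_cons]
    by_cases hy : w = "your"
    · subst hy; simp [nameIdScan, nameIdTail]
    · by_cases hn : w = "name"
      · subst hn; simp [nameIdScan, nameIdTail]
      · have hf : (w == "your" || w == "name") = false := by simp [hy, hn]
        rw [hf]
        simp only [Bool.false_eq_true, if_false]
        rw [ih]
        simp [nameIdScan, hy, hn]

-- ===== VERDICT (by name: the statement is the Claim_ definition above) =====
theorem name_identifier_spec : Claim_equal_name_identifier := by
  intro S _
  unfold Spec_name_identifier name_identifier name_identifier_alt
  show nameIdTail ((PySem.Str.split₀ S).foldl
      (fun acc i => if i == "your" || i == "name" then acc ++ [i] else acc) [])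
    = nameIdScan (PySem.Str.split₀ S)
  rw [nameId_foldl_filter, List.nil_append]
  exact nameId_agree (PySem.Str.split₀ S)
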